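-- pv_equiv track=rewrite | github.com/edu-ucsd-cse-231/fa12-schemec | schemec/gencpp.py | pretty_cpp
-- ===== SOURCE A (Python) =====
-- def pretty_cpp(code, nspace=2):
--     TERMINATORS = (' ', '\t', ':')
--     unindent = nspace // 2
--     # prettify code
--     pretty_code = code.splitlines()
--     indent = 0
--     for i, line in enumerate(pretty_code):
--         line = line.strip()
--         j = 0
--         if len(line) and line[0] == '}':
--             indent -= 1
--             j = 1
--         if len(line) and line[0] == '#':
--             prefix = ''
--         elif ((len(line) >= 5 and line[:5].lower() == 'case ') or
--             (len(line) >= 6 and line[:6].lower() == 'public'  and line[6] in TERMINATORS) or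
--             (len(line) >= 7 and line[:7].lower() == 'default' and line[7] in TERMINATORS) or
--             (len(line) >= 7 and line[:7].lower() == 'private' and line[7] in TERMINATORS)):
--             prefix = ' ' * (nspace * indent - unindent)
--         else:
--             prefix = ' ' * (nspace * indent)
--         pretty_code[i] = prefix + line
--         for char in line[j:]:
--             if char == '{':
--                 indent += 1
--             elif char == '}':
--                 indent -= 1
--     return '\n'.join(pretty_code)
-- ===== SOURCE B (Python) =====
-- def pretty_cpp(code, nspace=2):
--     TERM = (' ', '\t', ':')
--     unindent = nspace // 2
--     lines = [l.strip() for l in code.splitlines()]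
--     # The balance BEFORE each line is the prefix sum of WHOLE-line net brace
--     # counts: a leading '}' contributes the same -1 as A's pre-decrement, so no
--     # j-offset or in-render threading of the counter is needed.
--     bals = [0] * len(lines)
--     for i in range(1, len(lines)):
--         bals[i] = bals[i - 1] + lines[i - 1].count('{') - lines[i - 1].count('}')
--
--     def width(s, bal):
--         lvl = bal - (s[:1] == '}')
--         if s[:1] == '#':
--             return 0
--         if (s[:5].lower() == 'case '
--                 or (s[:6].lower() == 'public' and s[6:7] in TERM)
--                 or (s[:7].lower() in ('default', 'private') and s[7:8] in TERM)):
--             return nspace * lvl - unindent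
--         return nspace * lvl
--
--     return '\n'.join(' ' * width(s, b) + s for s, b in zip(lines, bals))
-- ===== Notes on version B (the rewrite author's own statement) =====
-- stated objective: alternative
-- what changed: A threads an indent counter through one read-modify-write loop, special-casing a leading '}' (pre-decrement plus a j offset excluding it from a char-by-char brace scan); B computes the balance before each line as a prefix sum of whole-line net brace counts (the leading '}' needs no special handling there), derives each display level as balance minus a leading-'}' flag, and renders in a separate zip pass with slice-based keyword tests instead of length-guarded indexing. (brace counting via str.count runs in C instead of A's per-character Python loop)
-- outside the precondition, e.g. on pretty_cpp('public', 2): A raises IndexError, B returns 'public'; on pretty_cpp('default', 2): A raises IndexError, B returns 'default'; on pretty_cpp('private', 2): A raises IndexError, B returns 'private'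
import Mathlib
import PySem

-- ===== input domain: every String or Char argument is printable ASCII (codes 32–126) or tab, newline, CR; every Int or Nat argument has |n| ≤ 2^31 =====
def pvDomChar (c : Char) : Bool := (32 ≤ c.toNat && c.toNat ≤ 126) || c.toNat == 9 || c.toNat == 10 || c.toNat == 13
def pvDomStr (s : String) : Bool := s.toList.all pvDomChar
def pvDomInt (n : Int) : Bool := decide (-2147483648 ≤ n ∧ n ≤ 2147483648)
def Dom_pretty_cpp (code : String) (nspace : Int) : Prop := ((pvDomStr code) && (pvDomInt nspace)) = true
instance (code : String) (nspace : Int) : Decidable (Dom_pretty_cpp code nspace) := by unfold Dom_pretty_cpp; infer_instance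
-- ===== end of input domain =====

-- B replaces A's single loop (threading an indent counter, pre-decrementing on a leading '}'
-- and excluding it from a char-by-char brace scan) by a prefix sum of whole-line net brace
-- counts plus a separate render pass; objective: alternative.

-- `' ' * n` (Python: a negative repeat count gives the empty string). Shared primitive of both ports.
def pySpaces (n : Int) : List Char := List.replicate n.toNat ' '

-- membership in the tuple TERMINATORS = (' ', '\t', ':')
def pvIsTerm (c : Char) : Bool := c = ' ' || c = '\t' || c = ':'

-- ===== PORT A =====
-- A's elif chain: `line[:k].lower() == …` (slice with nonnegative bounds = take) and
-- `line[k] in TERMINATORS` via pyGet? — `none` is Python's IndexError, excluded by Pre_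
-- (the port treats it as a false test there; those inputs are outside the claim).
def aSpecial (line : List Char) : Bool :=
  (decide (5 ≤ line.length) && (PySem.Chars.lower (line.take 5) == "case ".toList))
  || (decide (6 ≤ line.length) && (PySem.Chars.lower (line.take 6) == "public".toList)
        && ((PySem.List.pyGet? line 6).elim false pvIsTerm))
  || (decide (7 ≤ line.length) && (PySem.Chars.lower (line.take 7) == "default".toList)
        && ((PySem.List.pyGet? line 7).elim false pvIsTerm))
  || (decide (7 ≤ line.length) && (PySem.Chars.lower (line.take 7) == "private".toList)
        && ((PySem.List.pyGet? line 7).elim false pvIsTerm))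

-- A's inner loop `for char in line[j:]: …`
def aBrace : List Char → Int → Int
  | [], ind => ind
  | c :: cs, ind => aBrace cs (if c = '{' then ind + 1 else if c = '}' then ind - 1 else ind)

-- A's main `for i, line in enumerate(pretty_code)` loop, threading `indent`
def aLoop (nspace unindent : Int) : List (List Char) → Int → List (List Char)
  | [], _ => []
  | l :: rest, indent =>
    let line := PySem.Chars.strip l
    let indent1 := if line.head? = some '}' then indent - 1 else indent
    let j : Nat := if line.head? = some '}' then 1 else 0
    let pfx : List Char :=
      if line.head? = some '#' then []
      else if aSpecial line then pySpaces (nspace * indent1 - unindent)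
      else pySpaces (nspace * indent1)
    (pfx ++ line) :: aLoop nspace unindent rest (aBrace (line.drop j) indent1)

def pretty_cpp (code : String) (nspace : Int) : String :=
  String.ofList (PySem.Chars.join "\n".toList
    (aLoop nspace (PySem.Int.floordiv nspace 2) (PySem.Chars.splitlines code.toList) 0))

-- ===== PORT B =====
-- Source B's `bals` loop: balance before each line = prefix sum of whole-line net brace counts
def bBals : List (List Char) → Int → List Int
  | [], _ => []
  | l :: rest, bal =>
    bal :: bBals rest (bal + (PySem.Chars.count l "{".toList : Int) - (PySem.Chars.count l "}".toList : Int))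

-- Source B's `width(s, bal)`: slice-based keyword tests (`s[k:k+1] in TERM` = head? of drop k)
def bWidth (nspace unindent : Int) (s : List Char) (bal : Int) : Int :=
  let lvl : Int := bal - (if s.take 1 = ['}'] then 1 else 0)
  if s.take 1 = ['#'] then 0
  else if (PySem.Chars.lower (s.take 5) == "case ".toList)
       || ((PySem.Chars.lower (s.take 6) == "public".toList) && ((s.drop 6).head?.elim false pvIsTerm))
       || (((PySem.Chars.lower (s.take 7) == "default".toList)
            || (PySem.Chars.lower (s.take 7) == "private".toList))
           && ((s.drop 7).head?.elim false pvIsTerm))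
  then nspace * lvl - unindent
  else nspace * lvl

def pretty_cpp_alt (code : String) (nspace : Int) : String :=
  let lines := (PySem.Chars.splitlines code.toList).map PySem.Chars.strip
  String.ofList (PySem.Chars.join "\n".toList
    (List.zipWith (fun s b => pySpaces (bWidth nspace (PySem.Int.floordiv nspace 2) s b) ++ s)
      lines (bBals lines 0)))

-- ===== PRECONDITION & SPEC =====
-- Pre_ excludes exactly the inputs where A raises IndexError: a line whose stripped form is
-- (case-insensitively) exactly 'public', 'default' or 'private' makes A index one past its end.
def Pre_pretty_cpp (code : String) (nspace : Int) : Prop :=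
  ∀ l ∈ PySem.Chars.splitlines code.toList,
    PySem.Chars.lower (PySem.Chars.strip l) ≠ "public".toList ∧
    PySem.Chars.lower (PySem.Chars.strip l) ≠ "default".toList ∧
    PySem.Chars.lower (PySem.Chars.strip l) ≠ "private".toList
instance (code : String) (nspace : Int) : Decidable (Pre_pretty_cpp code nspace) := by
  unfold Pre_pretty_cpp; infer_instance

def pvWitness_pretty_cpp : String × Int := ("int f() {\ncase 1:\n}", 2)

def Spec_pretty_cpp (code : String) (nspace : Int) (out : String) : Prop := out = pretty_cpp_alt code nspace
instance (code : String) (nspace : Int) (out : String) : Decidable (Spec_pretty_cpp code nspace out) := by unfold Spec_pretty_cpp; infer_instance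

-- ===== CLAIM (what is proved, stated in full; the proofs are below) =====
def Claim_equal_pretty_cpp : Prop := ∀ (code : String) (nspace : Int), Dom_pretty_cpp code nspace → Pre_pretty_cpp code nspace → Spec_pretty_cpp code nspace (pretty_cpp code nspace)

-- ===== LEMMAS AND PROOFS =====

theorem pvCountGo_singleton (c : Char) (cs : List Char) : ∀ (fuel acc : Nat),
    cs.length ≤ fuel → PySem.Chars.count.go [c] fuel cs acc = acc + cs.count c := by
  induction cs with
  | nil =>
    intro fuel acc _
    cases fuel <;> simp [PySem.Chars.count.go]
  | cons hd t ih =>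
    intro fuel acc hf
    cases fuel with
    | zero => simp at hf
    | succ f =>
      have hstep : PySem.Chars.count.go [c] (f+1) (hd::t) acc =
          if [c].isPrefixOf (hd::t) then PySem.Chars.count.go [c] f (List.drop 1 (hd::t)) (acc+1)
          else PySem.Chars.count.go [c] f t acc := rfl
      rw [hstep]
      have hlen : t.length ≤ f := by simp at hf; omega
      by_cases hc : hd = c
      · simp [List.isPrefixOf, hc, ih _ _ hlen]
        omega
      · have hpf : ([c].isPrefixOf (hd::t)) = false := by
          simp [List.isPrefixOf]; exact fun h => absurd h.symm hc
        simp [hpf, ih _ _ hlen, hc]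

theorem pvCount_singleton (cs : List Char) (c : Char) :
    PySem.Chars.count cs [c] = cs.count c := by
  have : PySem.Chars.count cs [c] = PySem.Chars.count.go [c] cs.length cs 0 := rfl
  rw [this, pvCountGo_singleton c cs cs.length 0 le_rfl]
  omega

theorem pvLower_take_ne (line : List Char) (n : Nat) (w : List Char)
    (hn : ¬ n ≤ line.length) (hw : w.length = n) :
    (PySem.Chars.lower (line.take n) == w) = false := by
  rw [beq_eq_false_iff_ne]
  intro heq
  have := congrArg List.length heq
  simp [PySem.Chars.lower] at this
  omega

theorem pvGet_none (line : List Char) (n : Nat) (h : line.length ≤ n) :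
    PySem.List.pyGet? line (n : Int) = none := by
  simp [PySem.List.pyGet?, PySem.List.pyIdx?]
  omega

theorem pvGet_drop (line : List Char) (n : Nat) :
    PySem.List.pyGet? line (n : Int) = (line.drop n).head? := by
  by_cases h : n < line.length
  · simp [PySem.List.pyGet?, PySem.List.pyIdx?, h, List.head?_drop]
  · rw [pvGet_none line n (by omega)]
    rw [List.drop_eq_nil_of_le (by omega)]
    rfl

-- A's length-guarded keyword tests coincide with B's slice-based ones on every line
theorem pvSpecial_eq (line : List Char) :
    aSpecial line =
      ((PySem.Chars.lower (line.take 5) == "case ".toList)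
       || ((PySem.Chars.lower (line.take 6) == "public".toList) && ((line.drop 6).head?.elim false pvIsTerm))
       || (((PySem.Chars.lower (line.take 7) == "default".toList)
            || (PySem.Chars.lower (line.take 7) == "private".toList))
           && ((line.drop 7).head?.elim false pvIsTerm))) := by
  unfold aSpecial
  have h1 : (decide (5 ≤ line.length) && (PySem.Chars.lower (line.take 5) == "case ".toList))
      = (PySem.Chars.lower (line.take 5) == "case ".toList) := by
    by_cases h5 : 5 ≤ line.length
    · simp [h5]
    · rw [pvLower_take_ne line 5 "case ".toList h5 (by decide)]
      simp
  have h2 : ∀ (k : Nat) (w : List Char), w.length = k →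
      ((decide (k ≤ line.length) && (PySem.Chars.lower (line.take k) == w)
        && ((PySem.List.pyGet? line (k : Int)).elim false pvIsTerm))
      = ((PySem.Chars.lower (line.take k) == w) && ((line.drop k).head?.elim false pvIsTerm))) := by
    intro k w hw
    rw [pvGet_drop]
    by_cases hk : k ≤ line.length
    · simp [hk]
    · rw [pvLower_take_ne line k w hk hw]
      simp
  rw [h1]
  rw [show (6 : Int) = ((6 : Nat) : Int) from rfl, show (7 : Int) = ((7 : Nat) : Int) from rfl]
  rw [h2 6 "public".toList (by decide), h2 7 "default".toList (by decide),
      h2 7 "private".toList (by decide)]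
  cases hd : (PySem.Chars.lower (line.take 7) == "default".toList) <;>
    cases hp : (PySem.Chars.lower (line.take 7) == "private".toList) <;>
      cases ht : ((line.drop 7).head?.elim false pvIsTerm) <;> simp

theorem pvBrace_eq (cs : List Char) : ∀ ind : Int,
    aBrace cs ind = ind + (cs.count '{' : Int) - (cs.count '}' : Int) := by
  induction cs with
  | nil => intro ind; simp [aBrace]
  | cons c t ih =>
    intro ind
    simp only [aBrace, ih, List.count_cons]
    by_cases h1 : c = '{' <;> by_cases h2 : c = '}' <;>
      simp [h1, h2] <;> omega

-- A's post-line counter (pre-decrement + scan of line[j:]) equals the whole-line net count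
theorem pvNext_eq (line : List Char) (ind : Int) :
    aBrace (line.drop (if line.head? = some '}' then 1 else 0))
        (if line.head? = some '}' then ind - 1 else ind)
    = ind + (PySem.Chars.count line "{".toList : Int) - (PySem.Chars.count line "}".toList : Int) := by
  rw [show "{".toList = ['{'] from rfl, show "}".toList = ['}'] from rfl,
      pvCount_singleton, pvCount_singleton]
  by_cases hcl : line.head? = some '}'
  · obtain ⟨t, rfl⟩ : ∃ t, line = '}' :: t := by
      cases line with
      | nil => simp at hcl
      | cons a t => exact ⟨t, by simpa using congrArg (fun o => Option.getD o 'x' :: t) hcl⟩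
    simp [hcl, pvBrace_eq]
    omega
  · simp [hcl, pvBrace_eq]

theorem pvLoop_eq (nspace unindent : Int) (ls : List (List Char)) : ∀ ind : Int,
    aLoop nspace unindent ls ind =
      List.zipWith (fun s b => pySpaces (bWidth nspace unindent s b) ++ s)
        (ls.map PySem.Chars.strip)
        (bBals (ls.map PySem.Chars.strip) ind) := by
  induction ls with
  | nil => intro ind; rfl
  | cons l rest ih =>
    intro ind
    simp only [aLoop, bBals, List.map_cons, List.zipWith_cons_cons]
    rw [ih, pvNext_eq]
    have hpfx :
        (if (PySem.Chars.strip l).head? = some '#' then ([] : List Char)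
         else if aSpecial (PySem.Chars.strip l) then
           pySpaces (nspace * (if (PySem.Chars.strip l).head? = some '}' then ind - 1 else ind) - unindent)
         else pySpaces (nspace * (if (PySem.Chars.strip l).head? = some '}' then ind - 1 else ind)))
        = pySpaces (bWidth nspace unindent (PySem.Chars.strip l) ind) := by
      set line := PySem.Chars.strip l with hline
      have htake : ∀ c : Char, (line.take 1 = [c]) = (line.head? = some c) := by
        intro c
        cases line with
        | nil => simp
        | cons a t => simp
      unfold bWidth
      rw [← pvSpecial_eq]
      simp only [htake]
      by_cases hsh : line.head? = some '#'
      · have hcl : ¬ (line.head? = some '}') := by rw [hsh]; simp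
        simp [hsh, pySpaces]
      · by_cases hcl : line.head? = some '}' <;> by_cases hsp : aSpecial line <;>
          simp [hsh, hcl, hsp]
    rw [hpfx]

-- ===== VERDICT (by name: the statement is the Claim_ definition above) =====
theorem pretty_cpp_spec : Claim_equal_pretty_cpp := by
  intro code nspace _ _
  unfold Spec_pretty_cpp pretty_cpp pretty_cpp_alt
  rw [pvLoop_eq]
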